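-- pv_equiv track=rewrite | github.com/blackencino/fvdb-core | docs/wip/prototype/test_masked.py | _popcount_before
-- ===== SOURCE A (Python) =====
-- def _popcount_before(words, flat_idx):
--     """Reference popcount: count set bits before flat_idx."""
--     word_idx = flat_idx >> 6
--     bit_pos = flat_idx & 63
--     total = 0
--     for w in range(word_idx):
--         total += bin(int(words[w]) & 0xFFFFFFFFFFFFFFFF).count("1")
--     partial = int(words[word_idx]) & ((1 << bit_pos) - 1)
--     total += bin(partial & 0xFFFFFFFFFFFFFFFF).count("1")
--     return total
-- ===== SOURCE B (Python) =====
-- def _popcount_before(words, flat_idx):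
--     """Count set bits before flat_idx: walk the word prefix backwards and count
--     each word's bits by clearing the lowest set bit (Kernighan) instead of
--     formatting to binary and counting '1' characters."""
--     word_idx = flat_idx >> 6
--     partial = int(words[word_idx]) & ((1 << (flat_idx & 63)) - 1)
--     return _count_ones(partial) + _prefix_count(words, word_idx)
--
--
-- def _prefix_count(words, n):
--     total = 0
--     while n > 0:
--         n -= 1
--         total += _count_ones(int(words[n]) & 0xFFFFFFFFFFFFFFFF)
--     return total
--
--
-- def _count_ones(x):
--     c = 0
--     while x:
--         x &= x - 1
--         c += 1
--     return c
-- ===== Notes on version B (the rewrite author's own statement) =====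
-- stated objective: alternative
-- what changed: B counts each word's bits with Kernighan's clear-lowest-set-bit loop instead of bin().count('1'), and accumulates the word prefix with a backward while-loop helper instead of a forward for-range loop.
import Mathlib
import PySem

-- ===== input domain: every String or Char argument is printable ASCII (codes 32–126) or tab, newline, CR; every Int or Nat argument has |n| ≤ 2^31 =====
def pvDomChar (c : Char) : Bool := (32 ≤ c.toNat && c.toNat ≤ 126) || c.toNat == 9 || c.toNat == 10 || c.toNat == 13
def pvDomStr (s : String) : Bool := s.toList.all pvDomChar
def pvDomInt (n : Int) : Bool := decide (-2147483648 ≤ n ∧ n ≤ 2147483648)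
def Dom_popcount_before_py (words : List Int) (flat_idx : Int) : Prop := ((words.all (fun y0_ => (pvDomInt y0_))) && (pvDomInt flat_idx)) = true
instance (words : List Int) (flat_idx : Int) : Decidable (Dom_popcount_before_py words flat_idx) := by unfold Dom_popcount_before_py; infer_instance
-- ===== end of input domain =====

-- B counts each word's bits with Kernighan's clear-lowest-set-bit loop instead of
-- bin().count("1"), walking the word prefix backwards (objective: alternative).

-- ===== PORT A =====
-- bin(x).count("1") is PySem.Int.bitCount (exact for every int: bin(-5) = '-0b101');
-- 1 << bit_pos is 1 <<< bit_pos.toNat, exact because bit_pos = flat_idx & 63 is in [0, 63].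
def popcount_before_py (words : List Int) (flat_idx : Int) : Int :=
  let word_idx : Int := flat_idx >>> (6 : Nat)
  let bit_pos : Int := PySem.Int.band flat_idx 63
  let total : Int := (PySem.List.pyRange 0 word_idx 1).foldl
    (fun (total : Int) w =>
      total + (PySem.Int.bitCount
        (PySem.Int.band (PySem.List.pyGetD words w 0) 0xFFFFFFFFFFFFFFFF) : Int)) 0
  let part : Int := PySem.Int.band (PySem.List.pyGetD words word_idx 0)
    (((1:Int) <<< bit_pos.toNat) - 1)
  total + (PySem.Int.bitCount (PySem.Int.band part 0xFFFFFFFFFFFFFFFF) : Int)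

-- ===== PORT B =====
-- _count_ones: 'c = 0; while x: x &= x - 1; c += 1; return c'.  Exact for x ≥ 0 — the only
-- arguments B ever passes (results of &-masking with a nonnegative mask);
-- Python loops forever on x < 0, so the 'x ≤ 0' guard only makes the Lean function total there.
def count_ones_go (x c : Int) : Int :=
  if h : x ≤ 0 then c
  else count_ones_go (PySem.Int.band x (x - 1)) (c + 1)
termination_by x.toNat
decreasing_by
  rw [PySem.Int.band_of_nonneg (by omega) (by omega)]
  have hle : x.toNat &&& (x - 1).toNat ≤ (x - 1).toNat := Nat.and_le_right
  omega

def count_ones (x : Int) : Int := count_ones_go x 0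

-- _prefix_count: 'total = 0; while n > 0: n -= 1; total += _count_ones(words[n] & M)'
def prefix_count_go (words : List Int) (n total : Int) : Int :=
  if _h : n ≤ 0 then total
  else prefix_count_go words (n - 1)
    (total + count_ones (PySem.Int.band (PySem.List.pyGetD words (n - 1) 0) 0xFFFFFFFFFFFFFFFF))
termination_by n.toNat
decreasing_by omega

def prefix_count (words : List Int) (n : Int) : Int := prefix_count_go words n 0

def popcount_before_py_alt (words : List Int) (flat_idx : Int) : Int :=
  let word_idx : Int := flat_idx >>> (6 : Nat)
  let part : Int := PySem.Int.band (PySem.List.pyGetD words word_idx 0)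
    (((1:Int) <<< (PySem.Int.band flat_idx 63).toNat) - 1)
  count_ones part + prefix_count words word_idx

-- ===== PRECONDITION & SPEC =====
-- Pre_ excludes exactly the inputs where words[word_idx] (Python negative-wrapping index)
-- raises IndexError; the prefix loop then also stays in range.
def Pre_popcount_before_py (words : List Int) (flat_idx : Int) : Prop :=
  PySem.Raise.InRange words.length (flat_idx >>> (6 : Nat))
instance (words : List Int) (flat_idx : Int) : Decidable (Pre_popcount_before_py words flat_idx) := by unfold Pre_popcount_before_py; infer_instance

def pvWitness_popcount_before_py : List Int × Int := ([5, -3, 9], 70)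

def Spec_popcount_before_py (words : List Int) (flat_idx : Int) (out : Int) : Prop := out = popcount_before_py_alt words flat_idx
instance (words : List Int) (flat_idx : Int) (out : Int) : Decidable (Spec_popcount_before_py words flat_idx out) := by unfold Spec_popcount_before_py; infer_instance

-- ===== CLAIM (what is proved, stated in full; the proofs are below) =====
def Claim_equal_popcount_before_py : Prop := ∀ (words : List Int) (flat_idx : Int), Dom_popcount_before_py words flat_idx → Pre_popcount_before_py words flat_idx → Spec_popcount_before_py words flat_idx (popcount_before_py words flat_idx)

-- ===== LEMMAS AND PROOFS =====

-- bitCount on a natural number, the form the halving lemma speaks about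
def bcN (m : Nat) : Nat := PySem.Int.bitCount (m : Int)

lemma bcN_zero : bcN 0 = 0 := by decide

lemma bcN_halve (m : Nat) (h : 0 < m) : bcN m = m % 2 + bcN (m / 2) :=
  PySem.Int.bitCount_natCast h

lemma and_mod_two (a b : Nat) : (a &&& b) % 2 = a % 2 &&& b % 2 := by
  rw [← Nat.and_one_is_mod, ← Nat.and_one_is_mod, ← Nat.and_one_is_mod]
  have h : (1:Nat) = 1 &&& 1 := rfl
  conv_lhs => rw [h]
  ac_rfl

-- clearing the lowest set bit removes exactly one bit from the popcount
lemma bcN_and_pred : ∀ n : Nat, 0 < n → bcN n = bcN (n &&& (n - 1)) + 1 := by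
  intro n
  induction n using Nat.strong_induction_on with
  | _ n ih =>
    intro hn
    have hm2 := and_mod_two n (n - 1)
    have hd2 : (n &&& (n - 1)) / 2 = n / 2 &&& (n - 1) / 2 := Nat.and_div_two
    rcases Nat.mod_two_eq_zero_or_one n with he | ho
    · -- n even, n = 2k with k > 0
      have hk : 0 < n / 2 := by omega
      have hn1 : (n - 1) % 2 = 1 := by omega
      have hn1d : (n - 1) / 2 = n / 2 - 1 := by omega
      have hmod : (n &&& (n - 1)) % 2 = 0 := by rw [hm2, he, hn1]; decide
      have hdiv : (n &&& (n - 1)) / 2 = n / 2 &&& (n / 2 - 1) := by rw [hd2, hn1d]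
      have hbn : bcN n = bcN (n / 2) := by rw [bcN_halve n hn, he]; omega
      have ihk := ih (n / 2) (by omega) hk
      by_cases hz : n &&& (n - 1) = 0
      · have : n / 2 &&& (n / 2 - 1) = 0 := by
          rw [← hdiv, hz]
        rw [hz, bcN_zero, hbn, ihk, this, bcN_zero]
      · rw [bcN_halve _ (Nat.pos_of_ne_zero hz), hmod, hdiv, hbn, ihk]; omega
    · -- n odd, n = 2k + 1
      have hn1 : (n - 1) % 2 = 0 := by omega
      have hn1d : (n - 1) / 2 = n / 2 := by omega
      have hmod : (n &&& (n - 1)) % 2 = 0 := by rw [hm2, ho, hn1]; decide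
      have hdiv : (n &&& (n - 1)) / 2 = n / 2 := by rw [hd2, hn1d, Nat.and_self]
      have hbn : bcN n = 1 + bcN (n / 2) := by rw [bcN_halve n hn, ho]
      by_cases hz : n &&& (n - 1) = 0
      · have h2 : n / 2 = 0 := by rw [← hdiv, hz]
        rw [hz, bcN_zero, hbn, h2, bcN_zero]
      · rw [bcN_halve _ (Nat.pos_of_ne_zero hz), hmod, hdiv, hbn]
        omega

-- the Kernighan loop computes bitCount on nonnegative arguments
lemma count_ones_go_eq : ∀ (x c : Int), 0 ≤ x → count_ones_go x c = c + (bcN x.toNat : Int) := by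
  intro x c hx
  induction x, c using count_ones_go.induct with
  | case1 x c h =>
    have : x = 0 := le_antisymm h hx
    rw [count_ones_go, dif_pos h, this]
    simp [bcN_zero]
  | case2 x c h ih =>
    have hx1 : (0:Int) < x := by omega
    have hb : PySem.Int.band x (x - 1) = ((x.toNat &&& (x - 1).toNat : Nat) : Int) :=
      PySem.Int.band_of_nonneg (by omega) (by omega)
    have hbnn : (0:Int) ≤ PySem.Int.band x (x - 1) := by rw [hb]; exact Int.natCast_nonneg _
    rw [count_ones_go, dif_neg h, ih hbnn]
    have ht : (PySem.Int.band x (x - 1)).toNat = x.toNat &&& (x.toNat - 1) := by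
      rw [hb]
      have : (x - 1).toNat = x.toNat - 1 := by omega
      rw [Int.toNat_natCast, this]
    rw [ht]
    have := bcN_and_pred x.toNat (by omega)
    omega

lemma count_ones_eq (x : Int) (hx : 0 ≤ x) : count_ones x = (PySem.Int.bitCount x : Int) := by
  unfold count_ones
  rw [count_ones_go_eq x 0 hx]
  have : x = ((x.toNat : Nat) : Int) := by omega
  rw [this]
  simp [bcN]

-- x & m for a nonnegative mask m is in [0, m], whatever the sign of x
lemma band_mask_bounds (x m : Int) (hm : 0 ≤ m) :
    0 ≤ PySem.Int.band x m ∧ PySem.Int.band x m ≤ m := by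
  unfold PySem.Int.band
  by_cases hx : 0 ≤ x
  · simp only [if_pos hx, if_pos hm]
    have h : x.toNat &&& m.toNat ≤ m.toNat := Nat.and_le_right
    constructor
    · exact Int.natCast_nonneg _
    · omega
  · simp only [if_neg hx, if_pos hm]
    constructor
    · exact Int.natCast_nonneg _
    · omega

-- n &&& (2^64 - 1) = n for n < 2^64
lemma nat_and_mask (n : Nat) (h : n < 2^64) : n &&& 18446744073709551615 = n := by
  have : (18446744073709551615 : Nat) = 2^64 - 1 := by norm_num
  rw [this, Nat.and_two_pow_sub_one_eq_mod, Nat.mod_eq_of_lt h]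

-- masking an already-64-bit nonnegative value with 0xFFFF...F is the identity
lemma band_full_mask (x : Int) (hx : 0 ≤ x) (hx2 : x < 2^64) :
    PySem.Int.band x 0xFFFFFFFFFFFFFFFF = x := by
  rw [PySem.Int.band_of_nonneg hx (by norm_num)]
  have hxt : x.toNat < 2^64 := by omega
  have : (0xFFFFFFFFFFFFFFFF : Int).toNat = 18446744073709551615 := by decide
  rw [this, nat_and_mask x.toNat hxt]
  omega

-- A's forward for-range popcount sum equals B's backward while-loop helper
lemma loop_eq (words : List Int) : ∀ (k : Nat) (n : Int), n.toNat = k → ∀ t : Int,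
    prefix_count_go words n t =
      t + (PySem.List.pyRange 0 n 1).foldl
        (fun (total : Int) w =>
          total + (PySem.Int.bitCount
            (PySem.Int.band (PySem.List.pyGetD words w 0) 0xFFFFFFFFFFFFFFFF) : Int)) 0 := by
  intro k
  induction k with
  | zero =>
    intro n hn t
    have hle : n ≤ 0 := by omega
    rw [prefix_count_go, dif_pos hle, PySem.List.pyRange_one_eq_nil hle]
    simp
  | succ k ih =>
    intro n hn t
    have hpos : (0:Int) < n := by omega
    have hsplit : PySem.List.pyRange 0 n 1 = PySem.List.pyRange 0 (n-1) 1 ++ [n-1] := by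
      have h := PySem.List.pyRange_one_succ_right (show (0:Int) ≤ n-1 by omega)
      have : n - 1 + 1 = n := by ring
      rwa [this] at h
    have hg := band_mask_bounds (PySem.List.pyGetD words (n-1) 0) 0xFFFFFFFFFFFFFFFF (by norm_num)
    rw [prefix_count_go, dif_neg (by omega : ¬ n ≤ 0),
        ih (n-1) (by omega) _, hsplit, List.foldl_append,
        count_ones_eq _ hg.1]
    simp only [List.foldl_cons, List.foldl_nil]
    omega

-- ===== VERDICT (by name: the statement is the Claim_ definition above) =====
theorem popcount_before_py_spec : Claim_equal_popcount_before_py := by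
  intro words flat_idx _ _
  unfold Spec_popcount_before_py popcount_before_py popcount_before_py_alt prefix_count
  simp only []
  set wi : Int := flat_idx >>> (6 : Nat) with hwi
  set bp : Int := PySem.Int.band flat_idx 63 with hbp
  have hbp63 : 0 ≤ bp ∧ bp ≤ 63 := band_mask_bounds flat_idx 63 (by norm_num)
  have hmask_nonneg : (0 : Int) ≤ ((1:Int) <<< bp.toNat) - 1 := by
    rw [Int.shiftLeft_eq, one_mul]
    have : (1 : Int) ≤ 2 ^ bp.toNat := one_le_pow₀ (by norm_num)
    omega
  have hmask_lt : ((1:Int) <<< bp.toNat) - 1 < (2 : Int)^64 := by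
    rw [Int.shiftLeft_eq, one_mul]
    have hle : bp.toNat ≤ 63 := by omega
    have : (2 : Int) ^ bp.toNat ≤ 2 ^ 63 := pow_le_pow_right₀ (by norm_num) hle
    norm_num at this ⊢
    omega
  have hpart := band_mask_bounds (PySem.List.pyGetD words wi 0) (((1:Int) <<< bp.toNat) - 1)
    hmask_nonneg
  rw [band_full_mask _ hpart.1 (by omega),
      count_ones_eq _ hpart.1,
      loop_eq words wi.toNat wi rfl 0]
  omega
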